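-- pv_equiv track=rewrite | github.com/Gary9409/Algorithm | Code_Kata/2023-11-17/최대_힙.py | max_heap
-- ===== SOURCE A (Python) =====
-- import heapq
--
-- def max_heap(cmd):
--     heap = list()
--     log = []
--     for c in cmd:
--         if c == 0 and len(heap) == 0:
--             log.append(0)
--         elif c == 0:
--             n = -heapq.heappop(heap)
--             log.append(n)
--         else:
--             heapq.heappush(heap, -c)
--
--     return log
-- ===== SOURCE B (Python) =====
-- import bisect
--
-- def max_heap(cmd):
--     lst = []   # ascending sorted list of pushed values; max is the last element
--     log = []
--     for c in cmd:
--         if c == 0: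
--             log.append(lst.pop() if lst else 0)
--         else:
--             bisect.insort(lst, c)
--     return log
-- ===== Notes on version B (the rewrite author's own statement) =====
-- stated objective: simpler
-- what changed: Replaces the negated binary min-heap (heapq sift-up/sift-down maintenance) by a list kept in ascending order via bisect.insort, so the maximum is maintained by total ordering and popped from the end; the three branches collapse to two.
import Mathlib
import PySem

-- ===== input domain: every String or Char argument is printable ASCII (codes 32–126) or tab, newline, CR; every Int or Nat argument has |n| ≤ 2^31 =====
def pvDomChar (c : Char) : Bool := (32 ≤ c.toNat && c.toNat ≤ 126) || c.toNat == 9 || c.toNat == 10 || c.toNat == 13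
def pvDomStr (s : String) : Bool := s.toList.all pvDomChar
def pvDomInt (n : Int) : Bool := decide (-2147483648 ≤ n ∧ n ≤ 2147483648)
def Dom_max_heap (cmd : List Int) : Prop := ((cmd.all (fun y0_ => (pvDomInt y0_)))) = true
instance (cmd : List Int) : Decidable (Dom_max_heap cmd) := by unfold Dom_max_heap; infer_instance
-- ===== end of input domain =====

-- B replaces A's negated min-heap (heapq sift maintenance) by a list kept sorted ascending
-- via bisect.insort, popping the maximum from the end: simpler, same output.

-- ===== PORT A =====
-- A uses heapq.heappush/heappop; these are ported step for step from CPython's heapq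
-- (_siftdown / _siftup).  All list reads in reachable states are in range, so `getD _ 0`
-- is exact there.
def pvGet (h : List Int) (i : Nat) : Int := h.getD i 0

-- CPython heapq._siftdown: bubble `newitem` (conceptually at `pos`) up towards `startpos`;
-- parentpos = (pos - 1) >> 1 is inlined.
def pvSiftdownLoop (heap : List Int) (startpos pos : Nat) (newitem : Int) : List Int :=
  if _h : startpos < pos then
    if newitem < pvGet heap ((pos - 1) / 2) then
      pvSiftdownLoop (heap.set pos (pvGet heap ((pos - 1) / 2))) startpos ((pos - 1) / 2) newitem
    else heap.set pos newitem
  else heap.set pos newitem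
termination_by pos
decreasing_by omega

-- the child CPython's _siftup moves up: the right child iff it exists and left < right fails
def pvChild (heap : List Int) (pos endpos : Nat) : Nat :=
  if 2 * pos + 2 < endpos ∧ ¬ (pvGet heap (2 * pos + 1) < pvGet heap (2 * pos + 2)) then
    2 * pos + 2
  else 2 * pos + 1

-- CPython heapq._siftup main loop: move the smaller child up until reaching a leaf;
-- returns the final hole position.
def pvSiftupLoop (heap : List Int) (pos endpos : Nat) : List Int × Nat :=
  if _h : 2 * pos + 1 < endpos then
    pvSiftupLoop (heap.set pos (pvGet heap (pvChild heap pos endpos))) (pvChild heap pos endpos) endpos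
  else (heap, pos)
termination_by endpos - pos
decreasing_by unfold pvChild; split <;> omega

-- CPython heapq._siftup: loop, write newitem at the hole, then _siftdown back up
-- (newitem = heap[pos], read before the loop).
def pvSiftup (heap : List Int) (pos : Nat) : List Int :=
  pvSiftdownLoop
    ((pvSiftupLoop heap pos heap.length).1.set (pvSiftupLoop heap pos heap.length).2
      (pvGet heap pos))
    pos (pvSiftupLoop heap pos heap.length).2 (pvGet heap pos)

-- heapq.heappush: append, then _siftdown(heap, 0, len(heap)-1).
def pvHeappush (heap : List Int) (item : Int) : List Int :=
  pvSiftdownLoop (heap ++ [item]) 0 heap.length item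

-- heapq.heappop (A only calls it on a non-empty heap): pop the last element,
-- move it to the root, _siftup(heap, 0); returns (old root, new heap).
def pvHeappop (heap : List Int) : Int × List Int :=
  if heap.dropLast.length ≠ 0 then
    (pvGet heap.dropLast 0, pvSiftup (heap.dropLast.set 0 (pvGet heap (heap.length - 1))) 0)
  else (pvGet heap (heap.length - 1), heap.dropLast)

def pvMaxHeapGo (cs : List Int) (heap log : List Int) : List Int :=
  match cs with
  | [] => log
  | c :: rest =>
    if c = 0 ∧ heap.length = 0 then pvMaxHeapGo rest heap (log ++ [0])
    else if c = 0 then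
      let r := pvHeappop heap
      pvMaxHeapGo rest r.2 (log ++ [-r.1])
    else pvMaxHeapGo rest (pvHeappush heap (-c)) log

def max_heap (cmd : List Int) : List Int := pvMaxHeapGo cmd [] []

-- ===== PORT B =====
-- bisect.insort on a sorted list: insert x after any equal elements (bisect_right).
def pvInsort (lst : List Int) (x : Int) : List Int :=
  match lst with
  | [] => [x]
  | y :: ys => if x < y then x :: y :: ys else y :: pvInsort ys x

def pvAltGo (cs lst log : List Int) : List Int :=
  match cs with
  | [] => log
  | c :: rest =>
    if c = 0 then
      match lst.getLast? with
      | none => pvAltGo rest lst (log ++ [0])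
      | some m => pvAltGo rest lst.dropLast (log ++ [m])
    else pvAltGo rest (pvInsort lst c) log

def max_heap_alt (cmd : List Int) : List Int := pvAltGo cmd [] []

-- ===== PRECONDITION & SPEC =====
def Spec_max_heap (cmd : List Int) (out : List Int) : Prop := out = max_heap_alt cmd
instance (cmd : List Int) (out : List Int) : Decidable (Spec_max_heap cmd out) := by unfold Spec_max_heap; infer_instance

-- ===== CLAIM (what is proved, stated in full; the proofs are below) =====
def Claim_equal_max_heap : Prop := ∀ (cmd : List Int), Dom_max_heap cmd → Spec_max_heap cmd (max_heap cmd)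

-- ===== LEMMAS AND PROOFS =====

-- reading through a set
theorem pvGet_set (l : List Int) (i j : Nat) (a : Int) :
    pvGet (l.set i a) j = if j = i ∧ i < l.length then a else pvGet l j := by
  by_cases hij : j = i
  · subst hij
    by_cases hl : j < l.length
    · simp [pvGet, List.getD_eq_getElem?_getD, hl]
    · simp [pvGet, List.getD_eq_getElem?_getD, hl]
  · simp [pvGet, List.getD_eq_getElem?_getD, hij, Ne.symm hij]

theorem pvGet_mem (l : List Int) (j : Nat) (h : j < l.length) : pvGet l j ∈ l := by
  rw [pvGet, List.getD_eq_getElem l 0 h]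
  exact List.getElem_mem h

theorem set_pvGet_self (l : List Int) (i : Nat) (hi : i < l.length) :
    l.set i (pvGet l i) = l := by
  rw [pvGet, List.getD_eq_getElem l 0 hi]
  exact List.set_getElem_self ..

-- permutation facts about List.set
theorem pv_set_perm {α : Type} (l : List α) (i : Nat) (a : α) (h : i < l.length) :
    List.Perm (l.set i a) (a :: l.eraseIdx i) := by
  induction l generalizing i with
  | nil => simp at h
  | cons x xs IH =>
    cases i with
    | zero => simp
    | succ k =>
      have hk : k < xs.length := by simpa using h
      simp only [List.set_cons_succ, List.eraseIdx_cons_succ]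
      exact (List.Perm.cons x (IH k hk)).trans (List.Perm.swap a x _)

theorem pv_set_set_perm {α : Type} (l : List α) (i j : Nat) (a b : α)
    (hi : i < l.length) (hj : j < l.length) (hij : i ≠ j) :
    List.Perm ((l.set i a).set j b) ((l.set i b).set j a) := by
  induction l generalizing i j with
  | nil => simp at hi
  | cons x xs IH =>
    cases i with
    | zero =>
      cases j with
      | zero => exact absurd rfl hij
      | succ m =>
        have hm : m < xs.length := by simpa using hj
        simp only [List.set_cons_zero, List.set_cons_succ]
        exact ((List.Perm.cons a (pv_set_perm xs m b hm)).trans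
          (List.Perm.swap b a _)).trans (List.Perm.cons b (pv_set_perm xs m a hm).symm)
    | succ k =>
      cases j with
      | zero =>
        have hk : k < xs.length := by simpa using hi
        simp only [List.set_cons_zero, List.set_cons_succ]
        exact ((List.Perm.cons b (pv_set_perm xs k a hk)).trans
          (List.Perm.swap a b _)).trans (List.Perm.cons a (pv_set_perm xs k b hk).symm)
      | succ m =>
        have hk : k < xs.length := by simpa using hi
        have hm : m < xs.length := by simpa using hj
        simp only [List.set_cons_succ]
        exact List.Perm.cons x (IH k m hk hm (by omega))

-- min-heap property, single-index (parent ≤ child) form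
def IsHeapL (h : List Int) : Prop :=
  ∀ j, 0 < j → j < h.length → pvGet h ((j - 1) / 2) ≤ pvGet h j

-- heap except possibly the edge into `pos`; parent of `pos` already ≤ children of `pos`
def InvUp (c : List Int) (pos : Nat) : Prop :=
  (∀ j, 0 < j → j < c.length → j ≠ pos → pvGet c ((j - 1) / 2) ≤ pvGet c j) ∧
  (∀ j, 0 < j → j < c.length → (j - 1) / 2 = pos → 0 < pos → pvGet c ((pos - 1) / 2) ≤ pvGet c j)

-- heap except possibly the edges incident to the hole `pos`; parent of `pos` ≤ children of `pos`
def InvDown (c : List Int) (pos : Nat) : Prop :=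
  (∀ j, 0 < j → j < c.length → j ≠ pos → (j - 1) / 2 ≠ pos → pvGet c ((j - 1) / 2) ≤ pvGet c j) ∧
  (∀ j, 0 < j → j < c.length → (j - 1) / 2 = pos → 0 < pos → pvGet c ((pos - 1) / 2) ≤ pvGet c j)

theorem sdLoop_perm (pos : Nat) : ∀ (heap : List Int) (newitem : Int), pos < heap.length →
    List.Perm (pvSiftdownLoop heap 0 pos newitem) (heap.set pos newitem) := by
  induction pos using Nat.strong_induction_on with
  | _ pos IH =>
    intro heap newitem hlen
    rw [pvSiftdownLoop]
    split_ifs with h0 hlt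
    · have hp : (pos - 1) / 2 < heap.length := by omega
      have hpne : (pos - 1) / 2 ≠ pos := by omega
      refine (IH ((pos - 1) / 2) (by omega) _ newitem (by simpa using hp)).trans ?_
      refine (pv_set_set_perm heap pos ((pos - 1) / 2) (pvGet heap ((pos - 1) / 2)) newitem
        hlen hp (by omega)).trans ?_
      have hval : pvGet heap ((pos - 1) / 2) = pvGet (heap.set pos newitem) ((pos - 1) / 2) := by
        rw [pvGet_set]; simp [hpne]
      rw [hval, set_pvGet_self _ _ (by simpa using hp)]
    · exact List.Perm.refl _
    · exact List.Perm.refl _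

theorem sdLoop_heap (pos : Nat) : ∀ (heap : List Int) (newitem : Int), pos < heap.length →
    InvUp (heap.set pos newitem) pos → IsHeapL (pvSiftdownLoop heap 0 pos newitem) := by
  induction pos using Nat.strong_induction_on with
  | _ pos IH =>
    intro heap newitem hlen hinv
    obtain ⟨h1, h2⟩ := hinv
    have gc : ∀ j, pvGet (heap.set pos newitem) j = if j = pos then newitem else pvGet heap j := by
      intro j; rw [pvGet_set]
      by_cases hj : j = pos <;> simp [hj, hlen]
    have H1 : ∀ j, 0 < j → j < heap.length → j ≠ pos →
        (if (j - 1) / 2 = pos then newitem else pvGet heap ((j - 1) / 2)) ≤ pvGet heap j := by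
      intro j hj hjl hjp
      have := h1 j hj (by simpa using hjl) hjp
      rw [gc, gc] at this
      simpa [hjp] using this
    rw [pvSiftdownLoop]
    split_ifs with h0 hlt
    · -- recursive case: bubble up one level
      set p := (pos - 1) / 2 with hp_def
      have hplen : p < heap.length := by omega
      have hppos : p ≠ pos := by omega
      have H2 : ∀ j, 0 < j → j < heap.length → (j - 1) / 2 = pos →
          pvGet heap ((pos - 1) / 2) ≤ pvGet heap j := by
        intro j hj hjl hjc
        have := h2 j hj (by simpa using hjl) hjc h0
        rw [gc, gc] at this
        have hne2 : j ≠ pos := by omega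
        simpa [hppos, hne2, ← hp_def] using this
      apply IH p (by omega) _ newitem (by simpa using hplen)
      have gc' : ∀ j, pvGet ((heap.set pos (pvGet heap p)).set p newitem) j
          = if j = p then newitem else if j = pos then pvGet heap p else pvGet heap j := by
        intro j
        rw [pvGet_set, pvGet_set]
        by_cases hjp : j = p
        · simp [hjp, hplen]
        · by_cases hjpos : j = pos <;> simp [hjp, hjpos, hlen, hplen]
      constructor
      · intro j hj hjl hjne
        simp only [List.length_set] at hjl
        rw [gc', gc']
        by_cases hjpos : j = pos
        · subst hjpos
          rw [if_pos hp_def.symm, if_neg hppos.symm, if_pos rfl]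
          exact le_of_lt hlt
        · rw [if_neg hjne, if_neg hjpos]
          by_cases hq1 : (j - 1) / 2 = p
          · rw [if_pos hq1]
            have := H1 j hj hjl hjpos
            rw [hq1, if_neg hppos] at this
            exact le_trans (le_of_lt hlt) this
          · rw [if_neg hq1]
            by_cases hq2 : (j - 1) / 2 = pos
            · rw [if_pos hq2]
              exact H2 j hj hjl hq2
            · rw [if_neg hq2]
              have := H1 j hj hjl hjpos
              rwa [if_neg hq2] at this
      · intro j hj hjl hjc h0p
        simp only [List.length_set] at hjl
        have hgp_ne_p : (p - 1) / 2 ≠ p := by omega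
        have hp_lt_pos : p < pos := by omega
        have hgp_ne_pos : (p - 1) / 2 ≠ pos := by omega
        have hjnep : j ≠ p := by omega
        have hgp : pvGet heap ((p - 1) / 2) ≤ pvGet heap p := by
          have := H1 p h0p hplen hppos
          rwa [if_neg hgp_ne_pos] at this
        rw [gc', gc', if_neg hgp_ne_p, if_neg hgp_ne_pos, if_neg hjnep]
        by_cases hjnepos : j = pos
        · rw [if_pos hjnepos]
          exact hgp
        · rw [if_neg hjnepos]
          have hpj : pvGet heap p ≤ pvGet heap j := by
            have := H1 j hj hjl hjnepos
            rwa [hjc, if_neg hppos] at this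
          exact le_trans hgp hpj
    · -- newitem ≥ parent: write and stop
      intro j hj hjl
      simp only [List.length_set] at hjl
      rw [gc, gc]
      by_cases hjpos : j = pos
      · subst hjpos
        have hne : (j - 1) / 2 ≠ j := by omega
        rw [if_neg hne, if_pos rfl]
        exact le_of_not_gt hlt
      · rw [if_neg hjpos]
        exact H1 j hj hjl hjpos
    · -- pos = 0 (startpos reached)
      intro j hj hjl
      simp only [List.length_set] at hjl
      have hjpos : j ≠ pos := by omega
      rw [gc, gc, if_neg hjpos]
      exact H1 j hj hjl hjpos

theorem suLoop_spec (k : Nat) : ∀ (heap : List Int) (pos : Nat) (newitem : Int),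
    heap.length - pos = k → pos < heap.length →
    InvDown (heap.set pos newitem) pos →
    (pvSiftupLoop heap pos heap.length).2 < (pvSiftupLoop heap pos heap.length).1.length ∧
    (pvSiftupLoop heap pos heap.length).1.length = heap.length ∧
    InvUp ((pvSiftupLoop heap pos heap.length).1.set (pvSiftupLoop heap pos heap.length).2 newitem)
      (pvSiftupLoop heap pos heap.length).2 ∧
    List.Perm ((pvSiftupLoop heap pos heap.length).1.set (pvSiftupLoop heap pos heap.length).2 newitem)
      (heap.set pos newitem) := by
  induction k using Nat.strong_induction_on with
  | _ k IH =>
    intro heap pos newitem hk hpos hinv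
    obtain ⟨h1, h2⟩ := hinv
    have gc : ∀ j, pvGet (heap.set pos newitem) j = if j = pos then newitem else pvGet heap j := by
      intro j; rw [pvGet_set]
      by_cases hj : j = pos <;> simp [hj, hpos]
    have H1 : ∀ j, 0 < j → j < heap.length → j ≠ pos → (j - 1) / 2 ≠ pos →
        pvGet heap ((j - 1) / 2) ≤ pvGet heap j := by
      intro j hj hjl hjp hqp
      have := h1 j hj (by simpa using hjl) hjp hqp
      rw [gc, gc] at this
      simpa [hjp, hqp] using this
    have H2 : ∀ j, 0 < j → j < heap.length → (j - 1) / 2 = pos → 0 < pos →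
        pvGet heap ((pos - 1) / 2) ≤ pvGet heap j := by
      intro j hj hjl hjc h0p
      have := h2 j hj (by simpa using hjl) hjc h0p
      rw [gc, gc] at this
      have hne : (pos - 1) / 2 ≠ pos := by omega
      have hne2 : j ≠ pos := by omega
      simpa [hne, hne2] using this
    rw [pvSiftupLoop]
    split_ifs with hch
    · -- move the smaller child up, recurse at its position
      set ch := pvChild heap pos heap.length with hch_def
      have hchlt : ch < heap.length := by
        rw [hch_def, pvChild]; split_ifs with hc
        · exact hc.1
        · exact hch
      have hchrange : 2 * pos + 1 ≤ ch ∧ ch ≤ 2 * pos + 2 := by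
        rw [hch_def, pvChild]; split_ifs <;> omega
      have hmin : ∀ s, (s = 2 * pos + 1 ∨ s = 2 * pos + 2) → s < heap.length →
          pvGet heap ch ≤ pvGet heap s := by
        intro s hs hsl
        rw [hch_def, pvChild]; split_ifs with hc
        · rcases hs with rfl | rfl
          · exact le_of_not_gt hc.2
          · exact le_refl _
        · rcases hs with rfl | rfl
          · exact le_refl _
          · by_cases hlr : pvGet heap (2 * pos + 1) < pvGet heap (2 * pos + 2)
            · exact le_of_lt hlr
            · exact absurd ⟨hsl, hlr⟩ hc
      have hchpar : (ch - 1) / 2 = pos := by omega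
      have hchpos : ch ≠ pos := by omega
      have hlen' : (heap.set pos (pvGet heap ch)).length = heap.length := by simp
      have hinv' : InvDown ((heap.set pos (pvGet heap ch)).set ch newitem) ch := by
        have gc' : ∀ j, pvGet ((heap.set pos (pvGet heap ch)).set ch newitem) j
            = if j = ch then newitem else if j = pos then pvGet heap ch else pvGet heap j := by
          intro j
          rw [pvGet_set, pvGet_set]
          by_cases hjc : j = ch
          · simp [hjc, hchlt]
          · by_cases hjpos : j = pos <;> simp [hjc, hjpos, hpos, hchlt, Ne.symm hchpos]
        constructor
        · intro j hj hjl hjne hqne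
          simp only [List.length_set] at hjl
          rw [gc', gc', if_neg hjne, if_neg hqne]
          by_cases hjpos : j = pos
          · subst hjpos
            have hqp : (j - 1) / 2 ≠ j := by omega
            rw [if_neg hqp, if_pos rfl]
            exact H2 ch (by omega) hchlt hchpar hj
          · rw [if_neg hjpos]
            by_cases hqpos : (j - 1) / 2 = pos
            · rw [if_pos hqpos]
              exact hmin j (by omega) hjl
            · rw [if_neg hqpos]
              exact H1 j hj hjl hjpos hqpos
        · intro j hj hjl hjc _
          simp only [List.length_set] at hjl
          have hjch : j ≠ ch := by omega
          have hjpos : j ≠ pos := by omega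
          rw [gc', gc', hchpar, if_neg hchpos.symm, if_pos rfl, if_neg hjch, if_neg hjpos]
          have := H1 j hj hjl hjpos (by rw [hjc]; exact hchpos)
          rwa [hjc] at this
      have := IH (heap.length - ch) (by omega) (heap.set pos (pvGet heap ch)) ch newitem
        (by rw [hlen']) (by rw [hlen']; exact hchlt) hinv'
      simp only [List.length_set] at this
      obtain ⟨i1, i2, i3, i4⟩ := this
      refine ⟨i1, i2, i3, i4.trans ?_⟩
      refine (pv_set_set_perm heap pos ch (pvGet heap ch) newitem hpos hchlt hchpos.symm).trans ?_
      have hval : pvGet heap ch = pvGet (heap.set pos newitem) ch := by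
        rw [pvGet_set]; simp [hchpos]
      rw [hval, set_pvGet_self _ _ (by simpa using hchlt)]
    · -- leaf reached
      refine ⟨hpos, rfl, ⟨?_, ?_⟩, List.Perm.refl _⟩
      · intro j hj hjl hjne
        simp only [List.length_set] at hjl
        rw [gc, gc, if_neg hjne]
        by_cases hq : (j - 1) / 2 = pos
        · exact absurd hjl (by omega)
        · rw [if_neg hq]
          exact H1 j hj hjl hjne hq
      · intro j hj hjl hq _
        simp only [List.length_set] at hjl
        exact absurd hjl (by omega)

theorem heap_min (h : List Int) (hh : IsHeapL h) : ∀ j, j < h.length → pvGet h 0 ≤ pvGet h j := by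
  intro j
  induction j using Nat.strong_induction_on with
  | _ j IH =>
    intro hj
    rcases Nat.eq_zero_or_pos j with rfl | hpos
    · exact le_refl _
    · exact le_trans (IH ((j - 1) / 2) (by omega) (by omega)) (hh j hpos hj)

theorem heappush_spec (h : List Int) (x : Int) (hh : IsHeapL h) :
    IsHeapL (pvHeappush h x) ∧ List.Perm (pvHeappush h x) (x :: h) := by
  have hlen : h.length < (h ++ [x]).length := by simp
  have hg1 : ∀ j, j < h.length → pvGet (h ++ [x]) j = pvGet h j := by
    intro j hj
    simp [pvGet, List.getD_eq_getElem?_getD, List.getElem?_append_left hj]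
  have hgx : pvGet (h ++ [x]) h.length = x := by
    simp [pvGet, List.getD_eq_getElem?_getD]
  have hself : (h ++ [x]).set h.length x = h ++ [x] := by
    have := set_pvGet_self (h ++ [x]) h.length hlen
    rwa [hgx] at this
  constructor
  · apply sdLoop_heap h.length (h ++ [x]) x hlen
    rw [hself]
    constructor
    · intro j hj hjl hjne
      simp only [List.length_append, List.length_cons, List.length_nil] at hjl
      have hjlen : j < h.length := by omega
      rw [hg1 j hjlen, hg1 _ (by omega)]
      exact hh j hj hjlen
    · intro j hj hjl hjc _
      simp only [List.length_append, List.length_cons, List.length_nil] at hjl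
      exact absurd hjl (by omega)
  · refine (sdLoop_perm h.length (h ++ [x]) x hlen).trans ?_
    rw [hself]
    exact List.perm_append_singleton x h

theorem heappop_spec (h : List Int) (hh : IsHeapL h) (hne : 0 < h.length) :
    (pvHeappop h).1 = pvGet h 0 ∧ IsHeapL (pvHeappop h).2 ∧ List.Perm h ((pvHeappop h).1 :: (pvHeappop h).2) := by
  by_cases h2 : 2 ≤ h.length
  · -- at least two elements: move the last to the root and sift up
    have hcond : h.dropLast.length ≠ 0 := by simp [List.length_dropLast]; omega
    have hpop : pvHeappop h
        = (pvGet h.dropLast 0, pvSiftup (h.dropLast.set 0 (pvGet h (h.length - 1))) 0) := by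
      rw [pvHeappop, if_pos hcond]
    have hdl : ∀ j, j < h.length - 1 → pvGet h.dropLast j = pvGet h j := by
      intro j hj
      rw [pvGet, pvGet, List.getD_eq_getElem _ 0 (by simp [List.length_dropLast]; omega),
        List.getD_eq_getElem _ 0 (by omega)]
      exact List.getElem_dropLast ..
    set lastelt := pvGet h (h.length - 1) with hlast_def
    set g := h.dropLast.set 0 lastelt with hg_def
    have hgl : g.length = h.length - 1 := by simp [hg_def]
    have hg0 : pvGet g 0 = lastelt := by
      rw [hg_def, pvGet_set]
      simp [List.length_dropLast]; omega
    have hgk : ∀ k, 0 < k → pvGet g k = pvGet h.dropLast k := by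
      intro k hk
      rw [hg_def, pvGet_set, if_neg (by omega)]
    have hinvd : InvDown (g.set 0 (pvGet g 0)) 0 := by
      rw [set_pvGet_self g 0 (by omega)]
      constructor
      · intro j hj hjl hjne hqne
        have hq1 : 0 < (j - 1) / 2 := by omega
        rw [hgk j hj, hgk _ hq1, hdl j (by omega), hdl _ (by omega)]
        exact hh j hj (by omega)
      · intro j hj hjl hjc h0p
        exact absurd h0p (lt_irrefl 0)
    obtain ⟨i1, i2, i3, i4⟩ := suLoop_spec g.length g 0 (pvGet g 0) (by omega) (by omega) hinvd
    have hsif : IsHeapL (pvSiftup g 0) ∧ List.Perm (pvSiftup g 0) g := by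
      rw [pvSiftup]
      constructor
      · apply sdLoop_heap _ _ _ (by simpa using i1)
        rwa [List.set_set]
      · refine (sdLoop_perm _ _ _ (by simpa using i1)).trans ?_
        rw [List.set_set]
        refine i4.trans ?_
        rw [set_pvGet_self g 0 (by omega)]
    -- decompose h = d0 :: (dt ++ [lastelt])
    have hdlne : h.dropLast ≠ [] := by
      intro hcon; rw [hcon] at hcond; simp at hcond
    obtain ⟨d0, dt, hd⟩ : ∃ y ys, h.dropLast = y :: ys := by
      cases hdd : h.dropLast with
      | nil => exact absurd hdd hdlne
      | cons y ys => exact ⟨y, ys, rfl⟩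
    have hhne : h ≠ [] := by intro hcon; rw [hcon] at hne; simp at hne
    have hlast : h.getLast hhne = lastelt := by
      rw [hlast_def, List.getLast_eq_getElem, pvGet, List.getD_eq_getElem _ 0 (by omega)]
    have hsplit : h = d0 :: (dt ++ [lastelt]) := by
      conv_lhs => rw [← List.dropLast_append_getLast hhne]
      rw [hlast, hd]
      simp
    have hdl0 : pvGet h.dropLast 0 = d0 := by rw [hd]; simp [pvGet]
    have hp0 : pvGet h 0 = d0 := by rw [← hdl0, hdl 0 (by omega)]
    have hgperm : List.Perm g (lastelt :: dt) := by
      rw [hg_def, hd]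
      exact (pv_set_perm (d0 :: dt) 0 lastelt (by simp)).trans (by simp)
    refine ⟨?_, ?_, ?_⟩
    · rw [hpop]; exact hdl0.trans hp0.symm
    · rw [hpop]; exact hsif.1
    · rw [hpop]
      show List.Perm h (pvGet h.dropLast 0 :: pvSiftup g 0)
      rw [hdl0, hsplit]
      exact List.Perm.cons d0
        ((List.perm_append_singleton lastelt dt).trans (hsif.2.trans hgperm).symm)
  · -- exactly one element
    have h1 : h.length = 1 := by omega
    obtain ⟨a, rfl⟩ := List.length_eq_one_iff.mp h1
    refine ⟨?_, ?_, ?_⟩ <;> simp [pvHeappop, pvGet, IsHeapL]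

theorem insort_perm (lst : List Int) (x : Int) : List.Perm (pvInsort lst x) (x :: lst) := by
  induction lst with
  | nil => simp [pvInsort]
  | cons y ys IH =>
    simp only [pvInsort]
    split_ifs with hxy
    · exact List.Perm.refl _
    · exact (List.Perm.cons y IH).trans (List.Perm.swap x y ys)

theorem insort_sorted (lst : List Int) (x : Int) (hs : List.Pairwise (· ≤ ·) lst) :
    List.Pairwise (· ≤ ·) (pvInsort lst x) := by
  induction lst with
  | nil => simp [pvInsort]
  | cons y ys IH =>
    rcases List.pairwise_cons.mp hs with ⟨hy, hys⟩
    simp only [pvInsort]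
    split_ifs with hxy
    · refine List.pairwise_cons.mpr ⟨?_, hs⟩
      intro z hz
      rcases List.mem_cons.mp hz with rfl | hz
      · exact le_of_lt hxy
      · exact le_of_lt (lt_of_lt_of_le hxy (hy z hz))
    · refine List.pairwise_cons.mpr ⟨?_, IH hys⟩
      intro z hz
      rcases List.mem_cons.mp ((insort_perm ys x).mem_iff.mp hz) with rfl | hz
      · exact le_of_not_gt hxy
      · exact hy z hz

theorem sorted_getLast_max (lst : List Int) (m : Int) (hs : List.Pairwise (· ≤ ·) lst)
    (hm : lst.getLast? = some m) : ∀ y ∈ lst, y ≤ m := by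
  induction lst with
  | nil => simp at hm
  | cons y ys IH =>
    rcases List.pairwise_cons.mp hs with ⟨hy, hys⟩
    cases ys with
    | nil =>
      simp only [List.getLast?_singleton, Option.some.injEq] at hm
      subst hm; simp
    | cons z zs =>
      rw [List.getLast?_cons_cons] at hm
      intro w hw
      rcases List.mem_cons.mp hw with rfl | hw
      · exact le_trans (hy m (List.mem_of_getLast? hm)) (le_refl m)
      · exact IH hys hm w hw

-- coupling invariant between A's heap and B's sorted list
def RelHS (heap lst : List Int) : Prop :=
  IsHeapL heap ∧ List.Pairwise (· ≤ ·) lst ∧ List.Perm heap (lst.map (fun v => -v))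

theorem go_eq (cs : List Int) : ∀ heap lst log, RelHS heap lst →
    pvMaxHeapGo cs heap log = pvAltGo cs lst log := by
  induction cs with
  | nil => intro heap lst log _; rfl
  | cons c rest IH =>
    intro heap lst log hrel
    obtain ⟨hheap, hsort, hperm⟩ := hrel
    have hlen : heap.length = lst.length := by simpa using hperm.length_eq
    rw [pvMaxHeapGo, pvAltGo]
    by_cases hc : c = 0
    · cases hl : lst.getLast? with
      | none =>
        have hlst : lst = [] := by simpa using hl
        subst hlst
        have hlen0 : heap.length = 0 := by simpa using hlen
        rw [if_pos ⟨hc, hlen0⟩, if_pos hc]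
        exact IH heap [] (log ++ [0]) ⟨hheap, hsort, hperm⟩
      | some m =>
        have hlstne : lst ≠ [] := by intro hcon; rw [hcon] at hl; simp at hl
        have hlpos : 0 < lst.length := List.length_pos_of_ne_nil hlstne
        have hlen0 : heap.length ≠ 0 := by omega
        rw [if_neg (fun hcon => hlen0 hcon.2), if_pos hc, if_pos hc]
        obtain ⟨hp1, hp2, hp3⟩ := heappop_spec heap hheap (by omega)
        have hmmem : -m ∈ heap :=
          hperm.mem_iff.mpr (List.mem_map.mpr ⟨m, List.mem_of_getLast? hl, rfl⟩)
        have hle1 : pvGet heap 0 ≤ -m := by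
          obtain ⟨j, hjlen, hj⟩ := List.getElem_of_mem hmmem
          have hv : pvGet heap j = -m := by
            rw [pvGet, List.getD_eq_getElem _ 0 hjlen, hj]
          rw [← hv]
          exact heap_min heap hheap j hjlen
        have hle2 : -m ≤ pvGet heap 0 := by
          have hmem0 : pvGet heap 0 ∈ heap := pvGet_mem heap 0 (by omega)
          obtain ⟨v, hvmem, hv⟩ := List.mem_map.mp (hperm.mem_iff.mp hmem0)
          have := sorted_getLast_max lst m hsort hl v hvmem
          omega
        have hkey : pvGet heap 0 = -m := le_antisymm hle1 hle2
        have hm : m = lst.getLast hlstne := by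
          have := List.getLast?_eq_some_getLast hlstne
          rw [hl] at this
          exact Option.some.inj this
        have hlsplit : lst.dropLast ++ [m] = lst := by
          rw [hm]
          exact List.dropLast_append_getLast hlstne
        have hperm2 : List.Perm (pvHeappop heap).2 (lst.dropLast.map (fun v => -v)) := by
          have e1 : List.Perm ((pvHeappop heap).1 :: (pvHeappop heap).2)
              (lst.map (fun v => -v)) := hp3.symm.trans hperm
          rw [hp1, hkey] at e1
          have e2 : lst.map (fun v => -v) = lst.dropLast.map (fun v => -v) ++ [-m] := by
            conv_lhs => rw [← hlsplit]
            simp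
          rw [e2] at e1
          exact (e1.trans (List.perm_append_singleton _ _)).cons_inv
        have hrel' : RelHS (pvHeappop heap).2 lst.dropLast :=
          ⟨hp2, hsort.sublist (List.dropLast_sublist _), hperm2⟩
        have hgoal : pvMaxHeapGo rest (pvHeappop heap).2 (log ++ [-(pvHeappop heap).1])
            = pvAltGo rest lst.dropLast (log ++ [m]) := by
          rw [hp1, hkey, neg_neg]
          exact IH _ _ _ hrel'
        exact hgoal
    · rw [if_neg (fun hcon => hc hcon.1), if_neg hc, if_neg hc]
      obtain ⟨hh', hperm'⟩ := heappush_spec heap (-c) hheap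
      apply IH
      refine ⟨hh', insort_sorted lst c hsort, ?_⟩
      refine hperm'.trans ?_
      refine (List.Perm.cons (-c) hperm).trans ?_
      have hmap := ((insort_perm lst c).symm).map (fun v => -v)
      simpa using hmap

-- ===== VERDICT (by name: the statement is the Claim_ definition above) =====
theorem max_heap_spec : Claim_equal_max_heap := by
  intro cmd _
  unfold Spec_max_heap max_heap max_heap_alt
  exact go_eq cmd [] [] [] ⟨by intro j hj hl; simp at hl, List.Pairwise.nil, by simp⟩
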